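-- pv_equiv track=rewrite | github.com/teaguetomesh/dqva-and-circuit-cutting | simulator_sv.py | calculate_perms
-- ===== SOURCE A (Python) =====
-- import itertools
--
-- def calculate_perms(cluster_idx, complete_path_map):
--     cut_edge_input_qubits = []
--     for input_qubit in complete_path_map:
--         path = complete_path_map[input_qubit]
--         if len(path)>1:
--             for circ_idx, path_qubit in path[1:]:
--                 if circ_idx == cluster_idx:
--                     cut_edge_input_qubits.append(path_qubit)
--     perms = list(itertools.product(range(1,7),repeat=len(cut_edge_input_qubits)))
--     return perms, cut_edge_input_qubits
-- ===== SOURCE B (Python) =====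
-- def calculate_perms(cluster_idx, complete_path_map):
--     cut_edge_input_qubits = [path_qubit
--                              for path in complete_path_map.values()
--                              for circ_idx, path_qubit in path[1:]
--                              if circ_idx == cluster_idx]
--     n = len(cut_edge_input_qubits)
--     perms = []
--     for i in range(6 ** n):
--         digits = []
--         for _ in range(n):
--             i, d = divmod(i, 6)
--             digits.append(d + 1)
--         digits.reverse()
--         perms.append(tuple(digits))
--     return perms, cut_edge_input_qubits
-- ===== Notes on version B (the rewrite author's own statement) =====
-- stated objective: alternative
-- what changed: The cut-edge qubit collection becomes a single comprehension over the dict's values (no per-key lookup), and the 6^n assignment tuples are generated by base-6 decoding a single counter i in range(6**n) instead of calling itertools.product(range(1,7), repeat=n).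
import Mathlib
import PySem

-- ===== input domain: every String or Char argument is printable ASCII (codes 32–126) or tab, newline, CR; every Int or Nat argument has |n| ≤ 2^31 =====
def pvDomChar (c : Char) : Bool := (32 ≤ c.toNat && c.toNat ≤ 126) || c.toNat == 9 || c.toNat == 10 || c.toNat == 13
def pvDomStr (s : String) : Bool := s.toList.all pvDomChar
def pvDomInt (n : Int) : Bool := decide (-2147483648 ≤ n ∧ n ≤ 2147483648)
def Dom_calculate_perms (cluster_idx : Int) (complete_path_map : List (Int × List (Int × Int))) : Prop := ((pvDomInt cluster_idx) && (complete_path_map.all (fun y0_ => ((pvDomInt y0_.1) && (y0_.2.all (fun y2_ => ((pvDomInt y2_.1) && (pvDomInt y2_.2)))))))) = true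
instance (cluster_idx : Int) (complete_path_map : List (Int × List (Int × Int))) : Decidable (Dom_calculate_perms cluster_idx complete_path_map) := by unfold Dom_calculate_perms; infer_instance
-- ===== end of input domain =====

-- B restructures A: the cut-edge qubits become one comprehension over the dict's values (no key lookup),
-- and the 6^n assignment tuples are produced by base-6 decoding of a single counter instead of
-- itertools.product (objective: alternative; same cost, no speed claim).

-- ===== PORT A =====
-- itertools.product(range(1,7), repeat=n), transcribed from the documented pure-Python
-- equivalent of itertools.product (result = [x+[y] for x in result for y in pool], pools left to right); exact.
def pvProduct16 (n : Nat) : List (List Int) :=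
  (List.replicate n (PySem.List.pyRange 1 7 1)).foldl
    (fun result pool => result.flatMap (fun x => pool.map (fun y => x ++ [y]))) [[]]

def calculate_perms (cluster_idx : Int) (complete_path_map : List (Int × List (Int × Int))) : List (List Int) × List Int :=
  let d := PySem.Dict.ofList complete_path_map
  let cut_edge_input_qubits := d.items.foldl (fun acc kv =>
    let path := (d.get? kv.1).getD []
    if path.length > 1 then
      (PySem.List.slice path (some 1) none).foldl
        (fun acc p => if p.1 == cluster_idx then acc ++ [p.2] else acc) acc
    else acc) []
  let perms := pvProduct16 cut_edge_input_qubits.length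
  (perms, cut_edge_input_qubits)

-- ===== PORT B =====
-- the inner 'for _ in range(n): i, d = divmod(i, 6); digits.append(d + 1)' loop, then 'digits.reverse()'
def pvDigits : Nat → Int → List Int → List Int
  | 0, _, digits => digits.reverse
  | k+1, i, digits => pvDigits k (PySem.Int.floordiv i 6) (digits ++ [PySem.Int.mod i 6 + 1])

def calculate_perms_alt (cluster_idx : Int) (complete_path_map : List (Int × List (Int × Int))) : List (List Int) × List Int :=
  let cut_edge_input_qubits := (PySem.Dict.ofList complete_path_map).values.flatMap (fun path =>
    ((PySem.List.slice path (some 1) none).filter (fun p => p.1 == cluster_idx)).map Prod.snd)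
  let n := cut_edge_input_qubits.length
  let perms := (PySem.List.pyRange 0 ((6 : Int) ^ n) 1).map (fun i => pvDigits n i [])
  (perms, cut_edge_input_qubits)

-- ===== PRECONDITION & SPEC =====
def Spec_calculate_perms (cluster_idx : Int) (complete_path_map : List (Int × List (Int × Int))) (out : List (List Int) × List Int) : Prop := out = calculate_perms_alt cluster_idx complete_path_map
instance (cluster_idx : Int) (complete_path_map : List (Int × List (Int × Int))) (out : List (List Int) × List Int) : Decidable (Spec_calculate_perms cluster_idx complete_path_map out) := by unfold Spec_calculate_perms; infer_instance

-- ===== CLAIM (what is proved, stated in full; the proofs are below) =====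
def Claim_equal_calculate_perms : Prop := ∀ (cluster_idx : Int) (complete_path_map : List (Int × List (Int × Int))), Dom_calculate_perms cluster_idx complete_path_map → Spec_calculate_perms cluster_idx complete_path_map (calculate_perms cluster_idx complete_path_map)

-- ===== LEMMAS AND PROOFS =====

-- digits of i in base 6, least significant first, offset to 1..6 (proof-side spec of B's inner loop)
def pvLsb : Nat → Int → List Int
  | 0, _ => []
  | k+1, i => (PySem.Int.mod i 6 + 1) :: pvLsb k (PySem.Int.floordiv i 6)

lemma pvDigits_eq_lsb (k : Nat) (i : Int) (ds : List Int) :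
    pvDigits k i ds = (ds ++ pvLsb k i).reverse := by
  induction k generalizing i ds with
  | zero => simp [pvDigits, pvLsb]
  | succ k ih => simp [pvDigits, pvLsb, ih]

lemma cut_eq (c : Int) (m : List (Int × List (Int × Int))) :
    (PySem.Dict.ofList m).items.foldl (fun acc kv =>
      let path := ((PySem.Dict.ofList m).get? kv.1).getD []
      if path.length > 1 then
        (PySem.List.slice path (some 1) none).foldl
          (fun acc p => if p.1 == c then acc ++ [p.2] else acc) acc
      else acc) []
    = (PySem.Dict.ofList m).values.flatMap (fun path =>
        ((PySem.List.slice path (some 1) none).filter (fun p => p.1 == c)).map Prod.snd) := by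
  have hnd := PySem.Dict.nodup_keys_ofList m
  rw [PySem.List.foldl_congr_mem _ _
      (fun acc kv =>
        acc ++ ((PySem.List.slice kv.2 (some 1) none).filter (fun p => p.1 == c)).map Prod.snd) _
      ?_]
  · rw [PySem.List.foldl_append_eq_flatMap]
    show (PySem.Dict.ofList m).items.flatMap _ = ((PySem.Dict.ofList m).items.map Prod.snd).flatMap _
    rw [List.flatMap_map]
  · intro acc kv hkv
    have h1 : (PySem.Dict.ofList m).get? kv.1 = some kv.2 :=
      PySem.Dict.get?_of_mem_items _ (by simpa using hkv) hnd
    simp only [h1, Option.getD_some]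
    by_cases hl : kv.2.length > 1
    · simp only [hl, if_pos, PySem.List.foldl_append_if]
    · have hnil : PySem.List.slice kv.2 (some 1) none = [] := by
        rw [PySem.List.slice_from_one]
        cases h2 : kv.2 with
        | nil => rfl
        | cons a t =>
          cases t with
          | nil => rfl
          | cons b t' => rw [h2] at hl; simp at hl
      simp [hl, hnil]

lemma pvProduct16_succ (n : Nat) :
    pvProduct16 (n+1) = (pvProduct16 n).flatMap
      (fun x => (PySem.List.pyRange 1 7 1).map (fun y => x ++ [y])) := by
  unfold pvProduct16
  rw [List.replicate_succ' , List.foldl_append]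
  rfl

lemma range_mul_flatMap (m k : Nat) :
    List.range (m * k) = (List.range m).flatMap (fun q => (List.range k).map (fun r => q * k + r)) := by
  induction m with
  | zero => simp
  | succ m ih =>
    rw [Nat.succ_mul, List.range_add, ih, List.range_succ, List.flatMap_append]
    simp

lemma map_lsb_range (n : Nat) :
    (List.range (6 ^ n)).map (fun (j : Nat) => (pvLsb n ((j : Nat) : Int)).reverse) = pvProduct16 n := by
  have hpool : PySem.List.pyRange 1 7 1 = (List.range 6).map (fun (r : Nat) => ((r : Int) + 1)) := by decide
  induction n with
  | zero => rfl
  | succ n ih =>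
    rw [pow_succ, range_mul_flatMap, List.map_flatMap, pvProduct16_succ, ← ih, List.flatMap_map]
    congr 1
    funext q
    rw [List.map_map, hpool, List.map_map]
    apply List.map_congr_left
    intro r hr
    have hr6 : r < 6 := List.mem_range.mp hr
    have e1 : PySem.Int.mod (((q * 6 + r : Nat)) : Int) 6 = (r : Int) := by
      have h := PySem.Int.mod_natCast (q * 6 + r) 6
      have hm : (q * 6 + r) % 6 = r := by omega
      rw [hm] at h
      simpa using h
    have e2 : PySem.Int.floordiv (((q * 6 + r : Nat)) : Int) 6 = (q : Int) := by
      have h := PySem.Int.floordiv_natCast (q * 6 + r) 6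
      have hd : (q * 6 + r) / 6 = q := by omega
      rw [hd] at h
      simpa using h
    simp only [pvLsb, List.reverse_cons, Function.comp_apply]
    rw [e1, e2]

lemma perms_eq (n : Nat) :
    (PySem.List.pyRange 0 ((6 : Int) ^ n) 1).map (fun i => pvDigits n i []) = pvProduct16 n := by
  have hc : ((6 : Int)) ^ n = ((6 ^ n : Nat) : Int) := by push_cast; ring
  rw [hc, PySem.List.pyRange_zero_natCast, List.map_map]
  simpa [Function.comp, pvDigits_eq_lsb] using map_lsb_range n

-- ===== VERDICT (by name: the statement is the Claim_ definition above) =====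
theorem calculate_perms_spec : Claim_equal_calculate_perms := by
  intro c m _
  unfold Spec_calculate_perms calculate_perms calculate_perms_alt
  simp only [cut_eq c m, perms_eq]
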